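-- pv_equiv track=rewrite | github.com/mukerem/ICPC-Journey | ICPC WF 2021 Dhaka Practice /kattis_hexagonal_rooks.py | move6
-- ===== SOURCE A (Python) =====
-- def good(a, b):
--     if a < 1 or a > 11 or b < 1 or b > 11:
--         return False
--     a = abs(a-6)
--     if a + b > 11:
--         return False
--     return True
--
-- def move6(a, b):
--     c = []
--     u, v = 0, -1
--     while 1:
--         a += u
--         b += v
--         if not good(a, b):
--             break
--         c.append((a, b))
--     return c
-- ===== SOURCE B (Python) =====
-- def good(a, b):
--     if a < 1 or a > 11 or b < 1 or b > 11:
--         return False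
--     a = abs(a-6)
--     if a + b > 11:
--         return False
--     return True
--
-- def move6(a, b):
--     # Closed form: only b decreases, so the reachable cells are the whole
--     # descending range (a, b-1) .. (a, 1), provided the first step is valid.
--     if not good(a, b - 1):
--         return []
--     return [(a, j) for j in range(b - 1, 0, -1)]
-- ===== Notes on version B (the rewrite author's own statement) =====
-- stated objective: simpler
-- what changed: B replaces the step-by-step while loop with a break by a single validity test of the first cell plus a closed-form descending range comprehension.
import Mathlib
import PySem

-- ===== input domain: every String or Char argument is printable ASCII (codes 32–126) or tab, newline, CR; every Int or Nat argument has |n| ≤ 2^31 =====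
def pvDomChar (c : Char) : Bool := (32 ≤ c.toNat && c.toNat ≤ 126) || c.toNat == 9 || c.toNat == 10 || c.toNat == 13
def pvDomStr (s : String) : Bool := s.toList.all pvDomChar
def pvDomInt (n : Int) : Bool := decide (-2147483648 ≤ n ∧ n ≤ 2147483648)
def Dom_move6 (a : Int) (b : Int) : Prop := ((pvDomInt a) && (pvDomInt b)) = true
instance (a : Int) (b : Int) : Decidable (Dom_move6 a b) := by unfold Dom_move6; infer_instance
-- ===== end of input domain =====

-- B replaces A's step-by-step while loop (with break) by one validity test of the
-- first cell plus a closed-form descending range comprehension; objective: simpler.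

-- ===== PORT A =====
def goodA (a : Int) (b : Int) : Bool :=
  if a < 1 || a > 11 || b < 1 || b > 11 then false
  else if |a - 6| + b > 11 then false
  else true

-- the 'while 1' loop of A: a += 0, b += -1, break when not good, else append
def move6Loop (a : Int) (b : Int) (c : List (Int × Int)) : List (Int × Int) :=
  if h : goodA a (b - 1) = true then
    move6Loop a (b - 1) (c ++ [(a, b - 1)])
  else c
termination_by b.toNat
decreasing_by
  simp [goodA] at h
  omega

def move6 (a : Int) (b : Int) : List (Int × Int) := move6Loop a b []

-- ===== PORT B =====
def goodB (a : Int) (b : Int) : Bool :=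
  if a < 1 || a > 11 || b < 1 || b > 11 then false
  else if |a - 6| + b > 11 then false
  else true

def move6_alt (a : Int) (b : Int) : List (Int × Int) :=
  if !(goodB a (b - 1)) then []
  else (PySem.List.pyRange (b - 1) 0 (-1)).map (fun j => (a, j))

-- ===== PRECONDITION & SPEC =====
def Spec_move6 (a : Int) (b : Int) (out : List (Int × Int)) : Prop := out = move6_alt a b
instance (a : Int) (b : Int) (out : List (Int × Int)) : Decidable (Spec_move6 a b out) := by unfold Spec_move6; infer_instance

-- ===== CLAIM (what is proved, stated in full; the proofs are below) =====
def Claim_equal_move6 : Prop := ∀ (a : Int) (b : Int), Dom_move6 a b → Spec_move6 a b (move6 a b)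

-- ===== LEMMAS AND PROOFS =====
theorem goodA_bounds {a b : Int} (h : goodA a b = true) :
    1 ≤ a ∧ a ≤ 11 ∧ 1 ≤ b ∧ |a - 6| + b ≤ 11 := by
  simp [goodA] at h
  omega

theorem move6Loop_eq (n : Nat) : ∀ (a b : Int) (c : List (Int × Int)), b.toNat ≤ n →
    move6Loop a b c = c ++ (if goodA a (b - 1) = true then
      (PySem.List.pyRange (b - 1) 0 (-1)).map (fun j => (a, j)) else []) := by
  induction n with
  | zero =>
    intro a b c hb
    rw [move6Loop]
    by_cases h : goodA a (b - 1) = true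
    · exact absurd (goodA_bounds h).2.2.1 (by omega)
    · simp [h]
  | succ m ih =>
    intro a b c hb
    rw [move6Loop]
    by_cases h : goodA a (b - 1) = true
    · obtain ⟨ha1, ha2, hb1, hs⟩ := goodA_bounds h
      rw [ih a (b - 1) (c ++ [(a, b - 1)]) (by omega)]
      rw [PySem.List.pyRange_neg_one_cons (by omega : (0:Int) < b - 1)]
      by_cases h2 : goodA a (b - 1 - 1) = true
      · simp [h, h2]
      · have hb2 : b - 1 - 1 ≤ 0 := by
          by_contra hc
          exact h2 (by simp [goodA]; have := abs_nonneg (a - 6); omega)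
        rw [PySem.List.pyRange_neg_one_eq_nil (by omega : b - 1 - 1 ≤ (0:Int))]
        simp [h, h2]
    · simp [h]

-- ===== VERDICT (by name: the statement is the Claim_ definition above) =====
theorem move6_spec : Claim_equal_move6 := by
  intro a b _
  unfold Spec_move6 move6 move6_alt
  rw [move6Loop_eq b.toNat a b [] (le_refl _)]
  by_cases h : goodA a (b - 1) = true
  · simp [goodB, goodA] at h ⊢
    simp [h]
  · have hB : goodB a (b - 1) = false := by
      simp [goodA] at h
      simp [goodB]
      omega
    simp [h, hB]
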